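-- pv_equiv track=rewrite | github.com/aragroup1/SEO-MANAGER | backend/link_checker.py | _should_skip_link
-- ===== SOURCE A (Python) =====
-- SKIP_SCHEMES = {"mailto:", "tel:", "javascript:", "data:", "ftp:", "file:"}
--
-- SKIP_EXTENSIONS = {
--     ".jpg", ".jpeg", ".png", ".gif", ".svg", ".webp", ".ico",
--     ".css", ".js", ".pdf", ".zip", ".mp4", ".mp3", ".woff",
--     ".woff2", ".ttf", ".eot", ".map", ".xml", ".json",
-- }
--
-- def _should_skip_link(href: str) -> bool:
--     """Check if a link should be skipped."""
--     href = href.strip()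
--     if not href or href == "#" or href.startswith("#"):
--         return True
--     lower = href.lower()
--     for scheme in SKIP_SCHEMES:
--         if lower.startswith(scheme):
--             return True
--     # Skip common non-HTML file extensions
--     for ext in SKIP_EXTENSIONS:
--         if lower.endswith(ext):
--             return True
--     return False
-- ===== SOURCE B (Python) =====
-- SKIP_SCHEMES = {"mailto:", "tel:", "javascript:", "data:", "ftp:", "file:"}
--
-- SKIP_EXTENSIONS = {
--     ".jpg", ".jpeg", ".png", ".gif", ".svg", ".webp", ".ico",
--     ".css", ".js", ".pdf", ".zip", ".mp4", ".mp3", ".woff",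
--     ".woff2", ".ttf", ".eot", ".map", ".xml", ".json",
-- }
--
--
-- def _should_skip_link(href: str) -> bool:
--     """Check if a link should be skipped."""
--     href = href.strip()
--     if not href or href.startswith("#"):
--         return True
--     lower = href.lower()
--     colon = lower.find(":")
--     if colon != -1 and lower[:colon + 1] in SKIP_SCHEMES:
--         return True
--     dot = lower.rfind(".")
--     return dot != -1 and lower[dot:] in SKIP_EXTENSIONS
-- ===== Notes on version B (the rewrite author's own statement) =====
-- stated objective: idiomatic
-- what changed: Instead of scanning all 6 schemes with startswith and all 20 extensions with endswith, B derives two keys from the URL (the slice up to the first ':' and the slice from the last '.') and does a single set-membership lookup for each.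
import Mathlib
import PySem

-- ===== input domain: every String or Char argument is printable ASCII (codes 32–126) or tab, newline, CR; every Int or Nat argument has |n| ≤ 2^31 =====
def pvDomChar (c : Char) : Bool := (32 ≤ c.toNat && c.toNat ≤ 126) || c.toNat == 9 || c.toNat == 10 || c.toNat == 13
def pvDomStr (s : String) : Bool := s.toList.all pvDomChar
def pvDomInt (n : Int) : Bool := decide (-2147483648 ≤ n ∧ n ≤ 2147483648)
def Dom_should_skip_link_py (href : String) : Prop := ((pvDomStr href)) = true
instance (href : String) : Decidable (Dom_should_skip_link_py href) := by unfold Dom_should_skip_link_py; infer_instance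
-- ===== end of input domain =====

-- B derives the scheme key (slice up to the first ':') and the extension key (slice from
-- the last '.') and looks each up in the constant set, instead of A's startswith/endswith
-- scan over every pattern; objective: idiomatic (no speed claim).

-- module constants SKIP_SCHEMES / SKIP_EXTENSIONS (shared by both ports; Python set
-- iteration order does not affect the results computed here)
def pvSchemes : List (List Char) :=
  ["mailto:".toList, "tel:".toList, "javascript:".toList, "data:".toList,
   "ftp:".toList, "file:".toList]

def pvExts : List (List Char) :=
  [".jpg".toList, ".jpeg".toList, ".png".toList, ".gif".toList, ".svg".toList,
   ".webp".toList, ".ico".toList, ".css".toList, ".js".toList, ".pdf".toList,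
   ".zip".toList, ".mp4".toList, ".mp3".toList, ".woff".toList, ".woff2".toList,
   ".ttf".toList, ".eot".toList, ".map".toList, ".xml".toList, ".json".toList]

-- ===== PORT A =====
def should_skip_link_py (href : String) : Bool :=
  let h := PySem.Chars.strip href.toList
  if h.isEmpty || h == "#".toList || PySem.Chars.startswith h "#".toList then true
  else
    let lw := PySem.Chars.lower h
    if pvSchemes.any (fun s => PySem.Chars.startswith lw s) then true
    else if pvExts.any (fun e => PySem.Chars.endswith lw e) then true
    else false

-- ===== PORT B =====
def should_skip_link_py_alt (href : String) : Bool :=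
  let h := PySem.Chars.strip href.toList
  if h.isEmpty || PySem.Chars.startswith h "#".toList then true
  else
    let lw := PySem.Chars.lower h
    let colon := PySem.Chars.find lw [':']
    -- 'colon != -1 and lower[:colon + 1] in SKIP_SCHEMES'
    if (colon != -1) && pvSchemes.contains (PySem.List.slice lw none (some (colon + 1))) then
      true
    else
      let dot := PySem.Chars.rfind lw ['.']
      -- 'dot != -1 and lower[dot:] in SKIP_EXTENSIONS'
      (dot != -1) && pvExts.contains (PySem.List.slice lw (some dot) none)

-- ===== PRECONDITION & SPEC =====
def Spec_should_skip_link_py (href : String) (out : Bool) : Prop := out = should_skip_link_py_alt href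
instance (href : String) (out : Bool) : Decidable (Spec_should_skip_link_py href out) := by unfold Spec_should_skip_link_py; infer_instance

-- ===== CLAIM (what is proved, stated in full; the proofs are below) =====
def Claim_equal_should_skip_link_py : Prop := ∀ (href : String), Dom_should_skip_link_py href → Spec_should_skip_link_py href (should_skip_link_py href)

-- ===== LEMMAS AND PROOFS =====

lemma pv_singleton_prefix_drop (l : List Char) (i : Nat) (c : Char) :
    ([c] <+: l.drop i) ↔ l[i]? = some c := by
  constructor
  · rintro ⟨r, hr⟩
    have : (l.drop i)[0]? = some c := by rw [← hr]; rfl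
    simpa using this
  · intro h
    have hlt : i < l.length := by
      by_contra hge
      simp [List.getElem?_eq_none (le_of_not_gt hge)] at h
    refine ⟨l.drop (i + 1), ?_⟩
    have := List.drop_eq_getElem_cons hlt
    rw [this]
    have hc : l[i] = c := by simpa [List.getElem?_eq_getElem hlt] using h
    simp [hc]

lemma pv_find_of_split (q r : List Char) (c : Char) (hq : c ∉ q) :
    PySem.Chars.find (q ++ c :: r) [c] = (q.length : Int) := by
  have hin : [c] <:+: (q ++ c :: r) := ⟨q, r, by simp⟩
  have h0 : 0 ≤ PySem.Chars.find (q ++ c :: r) [c] :=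
    (PySem.Chars.find_nonneg_iff _ _).mpr hin
  obtain ⟨hpre, hmin⟩ := PySem.Chars.find_spec h0
  set n := (PySem.Chars.find (q ++ c :: r) [c]).toNat with hn
  have hql : [c] <+: (q ++ c :: r).drop q.length := by
    rw [List.drop_left]
    exact ⟨r, rfl⟩
  have hle : n ≤ q.length := by
    by_contra hgt
    exact hmin q.length (lt_of_not_ge hgt) hql
  have heq : n = q.length := by
    rcases lt_or_eq_of_le hle with hlt | he
    · exfalso
      have h1 : (q ++ c :: r)[n]? = some c := (pv_singleton_prefix_drop _ _ _).mp hpre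
      have h2 : (q ++ c :: r)[n]? = q[n]? := List.getElem?_append_left hlt
      have : q[n]? = some c := h2 ▸ h1
      exact hq (List.mem_of_getElem? this)
    · exact he
  have : PySem.Chars.find (q ++ c :: r) [c] = (n : Int) :=
    (Int.toNat_of_nonneg h0).symm
  rw [this, heq]

-- scheme key: the 'startswith over all patterns' scan equals a lookup of l[:find+1]
lemma pv_scheme_key (c : Char) (pats : List (List Char))
    (hp : ∀ p ∈ pats, p.dropLast ++ [c] = p ∧ c ∉ p.dropLast) (l : List Char) :
    pats.any (fun p => PySem.Chars.startswith l p) =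
      ((PySem.Chars.find l [c] != -1) &&
        pats.contains (PySem.List.slice l none (some (PySem.Chars.find l [c] + 1)))) := by
  by_cases hin : [c] <:+: l
  · have h0 : 0 ≤ PySem.Chars.find l [c] := (PySem.Chars.find_nonneg_iff _ _).mpr hin
    set n := (PySem.Chars.find l [c]).toNat with hn
    have hfind : PySem.Chars.find l [c] = (n : Int) := (Int.toNat_of_nonneg h0).symm
    have hne : (((n : Int)) != (-1 : Int)) = true :=
      bne_iff_ne.mpr (by omega)
    rw [hfind, hne, Bool.true_and]
    have hslice : PySem.List.slice l none (some ((n : Int) + 1)) = l.take (n + 1) := by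
      rw [PySem.List.slice_to l (by positivity)]
      congr 1
    rw [hslice]
    apply Bool.eq_iff_iff.mpr
    simp only [List.any_eq_true, PySem.Chars.startswith_iff, List.contains_iff_mem]
    constructor
    · rintro ⟨p, hpmem, hppre⟩
      obtain ⟨hsplit, hnotin⟩ := hp p hpmem
      obtain ⟨r, hr⟩ := hppre
      have hl : l = p.dropLast ++ c :: r := by
        rw [← hr, ← hsplit]; simp
      have hfeq : PySem.Chars.find l [c] = (p.dropLast.length : Int) := by
        rw [hl]; exact pv_find_of_split _ _ _ hnotin
      have hneq : n = p.dropLast.length := by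
        have := hfind ▸ hfeq; exact_mod_cast this
      have : l.take (n + 1) = p := by
        rw [hneq, hl, List.take_append]
        have h1 : List.take (p.dropLast.length + 1) p.dropLast = p.dropLast :=
          List.take_of_length_le (by omega)
        have h2 : p.dropLast.length + 1 - p.dropLast.length = 1 := by omega
        rw [h1, h2]
        simpa using hsplit
      rwa [this]
    · intro hmem
      exact ⟨l.take (n + 1), hmem, List.take_prefix _ _⟩
  · have hneg : PySem.Chars.find l [c] = -1 := (PySem.Chars.find_eq_neg_one_iff _ _).mpr hin
    rw [hneg]
    simp only [bne_self_eq_false, Bool.false_and]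
    simp only [List.any_eq_false]
    intro p hpmem
    obtain ⟨hsplit, _⟩ := hp p hpmem
    intro hsw
    apply hin
    have hppre : p <+: l := (PySem.Chars.startswith_iff _ _).mp hsw
    have hcp : [c] <:+: p := ⟨p.dropLast, [], by simp [hsplit]⟩
    exact hcp.trans hppre.isInfix

-- rfind.go unfolding equations
lemma pv_go_zero (s sub : List Char) :
    PySem.Chars.rfind.go s sub 0 = if sub.isPrefixOf s then 0 else -1 := rfl

lemma pv_go_succ (s sub : List Char) (j : Nat) :
    PySem.Chars.rfind.go s sub (j + 1) =
      if sub.isPrefixOf (s.drop (j + 1)) then ((j : Int) + 1) else PySem.Chars.rfind.go s sub j := rfl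

lemma pv_go_neg (s sub : List Char) :
    ∀ j, (∀ i ≤ j, ¬ sub <+: s.drop i) → PySem.Chars.rfind.go s sub j = -1 := by
  intro j
  induction j with
  | zero =>
    intro h
    rw [pv_go_zero]
    have : ¬ sub.isPrefixOf s := by
      rw [List.isPrefixOf_iff_prefix]
      simpa using h 0 le_rfl
    simp [this]
  | succ k ih =>
    intro h
    rw [pv_go_succ]
    have hc : ¬ sub.isPrefixOf (s.drop (k + 1)) := by
      rw [List.isPrefixOf_iff_prefix]
      exact h (k + 1) le_rfl
    simp only [hc]
    exact ih (fun i hi => h i (le_trans hi (Nat.le_succ k)))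

lemma pv_go_pos (s sub : List Char) (m : Nat) (hm : sub <+: s.drop m) :
    ∀ j, m ≤ j → (∀ i, m < i → i ≤ j → ¬ sub <+: s.drop i) →
      PySem.Chars.rfind.go s sub j = (m : Int) := by
  intro j
  induction j with
  | zero =>
    intro hmj _
    have hm0 : m = 0 := Nat.le_zero.mp hmj
    subst hm0
    rw [pv_go_zero]
    have : sub.isPrefixOf s := by
      rw [List.isPrefixOf_iff_prefix]; simpa using hm
    simp [this]
  | succ k ih =>
    intro hmj h
    rw [pv_go_succ]
    by_cases he : m = k + 1
    · have hpref : sub.isPrefixOf (s.drop (k + 1)) = true := by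
        rw [List.isPrefixOf_iff_prefix]; exact he ▸ hm
      simp only [hpref, if_true]
      rw [he]; push_cast; ring
    · have hmk : m ≤ k := by omega
      have hc : ¬ sub.isPrefixOf (s.drop (k + 1)) := by
        rw [List.isPrefixOf_iff_prefix]
        exact h (k + 1) (by omega) le_rfl
      simp only [hc]
      exact ih hmk (fun i hi hik => h i hi (le_trans hik (Nat.le_succ k)))

lemma pv_no_c_after (q r : List Char) (c : Char) (hr : c ∉ r) (i : Nat)
    (hi : q.length < i) : (q ++ c :: r)[i]? ≠ some c := by
  intro h
  have h2 : (q ++ c :: r)[i]? = (c :: r)[i - q.length]? :=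
    List.getElem?_append_right (le_of_lt hi)
  rw [h2] at h
  have h3 : (c :: r)[i - q.length]? = r[i - q.length - 1]? := by
    have : i - q.length = (i - q.length - 1) + 1 := by omega
    rw [this]; rfl
  rw [h3] at h
  exact hr (List.mem_of_getElem? h)

lemma pv_rfind_of_split (q r : List Char) (c : Char) (hr : c ∉ r) :
    PySem.Chars.rfind (q ++ c :: r) [c] = (q.length : Int) := by
  show PySem.Chars.rfind.go (q ++ c :: r) [c] (q ++ c :: r).length = (q.length : Int)
  apply pv_go_pos
  · rw [pv_singleton_prefix_drop]
    simp
  · simp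
  · intro i hi _ hpre
    exact pv_no_c_after q r c hr i hi ((pv_singleton_prefix_drop _ _ _).mp hpre)

lemma pv_rfind_neg (l : List Char) (c : Char) (hin : ¬ [c] <:+: l) :
    PySem.Chars.rfind l [c] = -1 := by
  apply pv_go_neg
  intro i _ hpre
  exact hin (hpre.isInfix.trans (List.drop_suffix i l).isInfix)

lemma pv_last_split (c : Char) (l : List Char) (h : c ∈ l) :
    ∃ q r, l = q ++ c :: r ∧ c ∉ r := by
  induction l using List.reverseRecOn with
  | nil => simp at h
  | append_singleton xs x ih =>
    by_cases hx : x = c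
    · exact ⟨xs, [], by simp [hx], by simp⟩
    · have hm : c ∈ xs := by
        rcases List.mem_append.mp h with h1 | h1
        · exact h1
        · exact absurd (List.mem_singleton.mp h1).symm hx
      obtain ⟨q, r, hl, hnr⟩ := ih hm
      have hcx : ¬ c = x := fun he => hx he.symm
      exact ⟨q, r ++ [x], by simp [hl], by simp [hnr, hcx]⟩

lemma pv_last_split_unique (q₁ r₁ q₂ r₂ : List Char) (c : Char)
    (h : q₁ ++ c :: r₁ = q₂ ++ c :: r₂) (h1 : c ∉ r₁) (h2 : c ∉ r₂) :
    q₁ = q₂ ∧ r₁ = r₂ := by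
  have hlen : q₁.length = q₂.length := by
    by_contra hne
    rcases Nat.lt_or_ge q₁.length q₂.length with hlt | hge
    · apply pv_no_c_after q₁ r₁ c h1 q₂.length hlt
      rw [h]
      simp
    · have hlt : q₂.length < q₁.length := by omega
      apply pv_no_c_after q₂ r₂ c h2 q₁.length hlt
      rw [← h]
      simp
  obtain ⟨hq, hcr⟩ := List.append_inj h hlen
  exact ⟨hq, by injection hcr⟩

-- extension key: the 'endswith over all patterns' scan equals a lookup of l[rfind:]
lemma pv_ext_key (l : List Char) :
    pvExts.any (fun e => PySem.Chars.endswith l e) =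
      ((PySem.Chars.rfind l ['.'] != -1) &&
        pvExts.contains (PySem.List.slice l (some (PySem.Chars.rfind l ['.'])) none)) := by
  have hp : ∀ e ∈ pvExts, e.head? = some '.' ∧ '.' ∉ e.tail := by decide
  by_cases hm : '.' ∈ l
  · obtain ⟨q, r, hl, hr⟩ := pv_last_split '.' l hm
    have hrf : PySem.Chars.rfind l ['.'] = (q.length : Int) := by
      rw [hl]; exact pv_rfind_of_split q r '.' hr
    have hne : (((q.length : Int)) != (-1 : Int)) = true :=
      bne_iff_ne.mpr (by omega)
    rw [hrf, hne, Bool.true_and]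
    have hslice : PySem.List.slice l (some ((q.length : Int))) none = '.' :: r := by
      rw [PySem.List.slice_from_natCast, hl, List.drop_left]
    rw [hslice]
    apply Bool.eq_iff_iff.mpr
    simp only [List.any_eq_true, PySem.Chars.endswith_iff, List.contains_iff_mem]
    constructor
    · rintro ⟨e, hemem, hesuf⟩
      obtain ⟨hhead, htail⟩ := hp e hemem
      obtain ⟨t, het⟩ : ∃ t, e = '.' :: t := by
        cases e with
        | nil => simp at hhead
        | cons a t => exact ⟨t, by simp at hhead; rw [hhead]⟩
      subst het
      obtain ⟨p, hpl⟩ := hesuf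
      have heq : q ++ '.' :: r = p ++ '.' :: t := by rw [← hl, ← hpl]
      obtain ⟨_, hrt⟩ := pv_last_split_unique q r p t '.' heq hr (by simpa using htail)
      rwa [hrt]
    · intro hmem
      exact ⟨'.' :: r, hmem, ⟨q, hl.symm⟩⟩
  · have hin : ¬ ['.'] <:+: l := fun h => hm (h.mem (by simp))
    rw [pv_rfind_neg l '.' hin]
    simp only [bne_self_eq_false, Bool.false_and]
    simp only [List.any_eq_false]
    intro e hemem hend
    obtain ⟨hhead, _⟩ := hp e hemem
    have hesuf : e <:+ l := (PySem.Chars.endswith_iff _ _).mp hend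
    apply hm
    apply hesuf.mem
    cases e with
    | nil => simp at hhead
    | cons a t => simp at hhead; simp [hhead]

-- ===== VERDICT (by name: the statement is the Claim_ definition above) =====
theorem should_skip_link_py_spec : Claim_equal_should_skip_link_py := by
  intro href _
  unfold Spec_should_skip_link_py should_skip_link_py should_skip_link_py_alt
  dsimp only
  generalize PySem.Chars.strip href.toList = h
  by_cases he : h = "#".toList
  · subst he; rfl
  · have he' : (h == "#".toList) = false := by simpa using he
    simp only [he', Bool.or_false]
    cases hg : (h.isEmpty || PySem.Chars.startswith h "#".toList) with
    | true => rfl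
    | false =>
      simp only [Bool.false_eq_true, if_false]
      rw [pv_scheme_key ':' pvSchemes (by decide), pv_ext_key]
      generalize ((PySem.Chars.find (PySem.Chars.lower h) [':'] != -1) &&
        pvSchemes.contains (PySem.List.slice (PySem.Chars.lower h) none
          (some (PySem.Chars.find (PySem.Chars.lower h) [':'] + 1)))) = x
      generalize ((PySem.Chars.rfind (PySem.Chars.lower h) ['.'] != -1) &&
        pvExts.contains (PySem.List.slice (PySem.Chars.lower h)
          (some (PySem.Chars.rfind (PySem.Chars.lower h) ['.'])) none)) = y
      cases x <;> cases y <;> rfl
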